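-- pv_equiv track=rewrite | github.com/SatyaRaghuNandan/BigData-Interview-Prep | Meta/combined_output_566.py | sign_check
-- ===== SOURCE A (Python) =====
-- def sign_check(s):
--     ptr = 0
--     sign_count = 0
--     while ptr < len(s) and s[ptr] in "+-":
--         ptr += 1
--         sign_count += 1
--         if sign_count > 1: return (False, -1)
--     return (True, ptr)
-- ===== SOURCE B (Python) =====
-- def sign_check(s):
--     if len(s) >= 2 and s[0] in "+-" and s[1] in "+-":
--         return (False, -1)
--     if len(s) >= 1 and s[0] in "+-":
--         return (True, 1)
--     return (True, 0)
-- ===== Notes on version B (the rewrite author's own statement) =====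
-- stated objective: simpler
-- what changed: Replaced the while-loop with pointer and sign counter by three loop-free branches on the first two characters, since at most two leading signs ever matter.
import Mathlib
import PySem

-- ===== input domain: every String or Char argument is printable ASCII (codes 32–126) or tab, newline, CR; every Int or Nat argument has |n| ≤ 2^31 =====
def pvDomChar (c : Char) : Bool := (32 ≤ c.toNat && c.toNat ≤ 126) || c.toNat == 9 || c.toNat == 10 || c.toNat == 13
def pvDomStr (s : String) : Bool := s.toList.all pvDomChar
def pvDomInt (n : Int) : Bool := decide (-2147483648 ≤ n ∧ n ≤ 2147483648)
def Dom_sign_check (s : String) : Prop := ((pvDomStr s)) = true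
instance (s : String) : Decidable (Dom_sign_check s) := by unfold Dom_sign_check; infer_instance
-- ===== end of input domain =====

-- ===== PORT A =====
-- B replaces A's while-loop over a pointer and sign counter with loop-free branches on the first two characters.
def pvIsSign (c : Char) : Bool := c == '+' || c == '-'

-- A's while-loop, transliterated as recursion over the remaining characters with the same ptr/sign_count state
def pvLoopA : List Char → Int → Int → Bool × Int
  | [], ptr, _ => (true, ptr)
  | c :: rest, ptr, sc =>
    if pvIsSign c then
      if sc + 1 > 1 then (false, -1) else pvLoopA rest (ptr + 1) (sc + 1)
    else (true, ptr)

def sign_check (s : String) : Bool × Int := pvLoopA s.toList 0 0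

-- ===== PORT B =====
def sign_check_alt (s : String) : Bool × Int :=
  let cs := s.toList
  if 2 ≤ cs.length ∧ pvIsSign (cs.getD 0 ' ') ∧ pvIsSign (cs.getD 1 ' ') then (false, -1)
  else if 1 ≤ cs.length ∧ pvIsSign (cs.getD 0 ' ') then (true, 1)
  else (true, 0)

-- ===== PRECONDITION & SPEC =====
def Spec_sign_check (s : String) (out : Bool × Int) : Prop := out = sign_check_alt s
instance (s : String) (out : Bool × Int) : Decidable (Spec_sign_check s out) := by unfold Spec_sign_check; infer_instance

-- ===== CLAIM (what is proved, stated in full; the proofs are below) =====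
def Claim_equal_sign_check : Prop := ∀ (s : String), Dom_sign_check s → Spec_sign_check s (sign_check s)

-- ===== LEMMAS AND PROOFS =====

-- ===== VERDICT (by name: the statement is the Claim_ definition above) =====
theorem sign_check_spec : Claim_equal_sign_check := by
  intro s _
  unfold Spec_sign_check sign_check sign_check_alt
  match h : s.toList with
  | [] => simp [pvLoopA]
  | [c] => by_cases hc : pvIsSign c <;> simp [pvLoopA, hc]
  | c :: d :: rest =>
    by_cases hc : pvIsSign c <;> by_cases hd : pvIsSign d <;>
      simp [pvLoopA, hc, hd]
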